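-- pv_equiv track=rewrite | github.com/NeehadToushif/SelfStudy | intermidiate/modArray.py | solve
-- ===== SOURCE A (Python) =====
-- def solve(A, B):
--     ans = 0
--     exp = 1
--     n = len(A)
--     # for i,d in enumerate(A):
--     #     ans = (ans + (d*10**(n-i-1))%B )%B
--     # return ans
--     for i in range(n-1,-1,-1):
--         temp = A[i]*exp % B
--         ans = (ans+temp) % B
--         exp = exp*10 % B
--     return ans
-- ===== SOURCE B (Python) =====
-- def solve(A, B):
--     ans = 0
--     for d in A:
--         ans = (ans * 10 + d) % B
--     return ans
-- ===== Notes on version B (the rewrite author's own statement) =====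
-- stated objective: simpler
-- what changed: Replaces the backwards index loop that maintains a running power-of-ten (exp) with Horner's method: a single forward pass over the digits carrying only the reduced value, ans = (ans*10 + d) % B.
import Mathlib
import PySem

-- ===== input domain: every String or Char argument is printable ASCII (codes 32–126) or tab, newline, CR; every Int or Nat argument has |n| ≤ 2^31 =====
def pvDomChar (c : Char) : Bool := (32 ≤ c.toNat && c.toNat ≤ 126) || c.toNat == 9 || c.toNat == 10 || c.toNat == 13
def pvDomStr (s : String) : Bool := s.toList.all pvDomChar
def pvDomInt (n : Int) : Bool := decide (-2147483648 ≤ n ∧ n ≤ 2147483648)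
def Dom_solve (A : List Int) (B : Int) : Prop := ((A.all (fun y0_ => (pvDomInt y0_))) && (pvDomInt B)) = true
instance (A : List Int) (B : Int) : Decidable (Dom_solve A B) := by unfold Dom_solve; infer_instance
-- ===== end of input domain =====

-- B: Horner's method — one forward pass carrying only the reduced value, no running power-of-ten.


-- ===== PORT A =====
def solve (A : List Int) (B : Int) : Int :=
  let n : Int := A.length
  ((PySem.List.pyRange (n - 1) (-1) (-1)).foldl
    (fun (st : Int × Int) i =>
      let temp := PySem.Int.mod (PySem.List.pyGetD A i 0 * st.2) B
      (PySem.Int.mod (st.1 + temp) B, PySem.Int.mod (st.2 * 10) B))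
    (0, 1)).1

-- ===== PORT B =====
def solve_alt (A : List Int) (B : Int) : Int :=
  A.foldl (fun ans d => PySem.Int.mod (ans * 10 + d) B) 0

-- ===== PRECONDITION & SPEC =====
-- Pre_ excludes exactly the inputs where Python raises ZeroDivisionError: B = 0 with a nonempty A
-- (both programs' % then raises; with A = [] no % runs and both return 0).
def Pre_solve (A : List Int) (B : Int) : Prop := A = [] ∨ B ≠ 0
instance (A : List Int) (B : Int) : Decidable (Pre_solve A B) := by unfold Pre_solve; infer_instance
def pvWitness_solve : List Int × Int := ([3, 1, 4], 7)
def Spec_solve (A : List Int) (B : Int) (out : Int) : Prop := out = solve_alt A B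
instance (A : List Int) (B : Int) (out : Int) : Decidable (Spec_solve A B out) := by unfold Spec_solve; infer_instance

-- ===== CLAIM (what is proved, stated in full; the proofs are below) =====
def Claim_equal_solve : Prop := ∀ (A : List Int) (B : Int), Dom_solve A B → Pre_solve A B → Spec_solve A B (solve A B)

-- ===== LEMMAS AND PROOFS =====

-- the plain decimal value of the digit list (Horner, no reduction)
def pvVal (A : List Int) : Int := A.foldl (fun x d => x * 10 + d) 0

theorem pvModEq_mod (x b : Int) : PySem.Int.mod x b ≡ x [ZMOD b] := by
  have h := PySem.Int.floordiv_mul_add_mod x b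
  exact Int.ModEq.symm (Int.modEq_iff_dvd.mpr
    ⟨-PySem.Int.floordiv x b, by linear_combination h⟩)

theorem pvMod_congr {x y b : Int} (h : x ≡ y [ZMOD b]) : PySem.Int.mod x b = PySem.Int.mod y b := by
  by_cases hb : b = 0
  · subst hb
    have : x = y := by simpa [Int.ModEq] using h
    rw [this]
  · have hcong : PySem.Int.mod x b ≡ PySem.Int.mod y b [ZMOD b] :=
      ((pvModEq_mod x b).trans h).trans (pvModEq_mod y b).symm
    have hd : b ∣ (PySem.Int.mod y b - PySem.Int.mod x b) := Int.ModEq.dvd hcong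
    rcases lt_or_gt_of_ne hb with hneg | hpos
    · have h1 := PySem.Int.mod_neg_bounds x hneg
      have h2 := PySem.Int.mod_neg_bounds y hneg
      have hz : PySem.Int.mod y b - PySem.Int.mod x b = 0 := by
        refine Int.eq_zero_of_abs_lt_dvd hd.neg_left ?_
        rw [abs_lt]; constructor <;> omega
      omega
    · have h1n := PySem.Int.mod_nonneg x hpos
      have h1l := PySem.Int.mod_lt x hpos
      have h2n := PySem.Int.mod_nonneg y hpos
      have h2l := PySem.Int.mod_lt y hpos
      have hz : PySem.Int.mod y b - PySem.Int.mod x b = 0 := by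
        refine Int.eq_zero_of_abs_lt_dvd hd ?_
        rw [abs_lt]; constructor <;> omega
      omega

theorem pvVal_from (t : List Int) (a : Int) :
    t.foldl (fun x d => x * 10 + d) a = a * 10 ^ t.length + pvVal t := by
  induction t generalizing a with
  | nil => simp [pvVal]
  | cons d t ih =>
    rw [List.foldl_cons, ih (a * 10 + d)]
    have hv : pvVal (d :: t) = d * 10 ^ t.length + pvVal t := by
      rw [pvVal, List.foldl_cons, show (0 : Int) * 10 + d = d by ring, ih d]
    rw [List.length_cons, hv]
    ring

theorem pvAlt_mod (B : Int) (A : List Int) (a : Int) :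
    A.foldl (fun ans d => PySem.Int.mod (ans * 10 + d) B) (PySem.Int.mod a B) =
      PySem.Int.mod (A.foldl (fun x d => x * 10 + d) a) B := by
  induction A generalizing a with
  | nil => rfl
  | cons d t ih =>
    simp only [List.foldl_cons]
    rw [pvMod_congr (((pvModEq_mod a B).mul_right 10).add_right d), ih (a * 10 + d)]

theorem pvMod_zero_left (B : Int) : PySem.Int.mod 0 B = 0 := by
  simp [PySem.Int.mod, Int.zero_fmod]

theorem solve_alt_eq (A : List Int) (B : Int) : solve_alt A B = PySem.Int.mod (pvVal A) B := by
  rw [solve_alt, ← pvMod_zero_left B, pvAlt_mod, pvVal]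

-- the body of A's loop as a fold over the digits themselves
def pvG (B : Int) (st : Int × Int) (d : Int) : Int × Int :=
  (PySem.Int.mod (st.1 + PySem.Int.mod (d * st.2) B) B, PySem.Int.mod (st.2 * 10) B)

theorem pvFoldr_G (B : Int) (A : List Int) (a e : Int) :
    (A.foldr (fun d st => pvG B st d) (PySem.Int.mod a B, e)).1 =
        PySem.Int.mod (a + e * pvVal A) B ∧
      (A.foldr (fun d st => pvG B st d) (PySem.Int.mod a B, e)).2 ≡
        e * 10 ^ A.length [ZMOD B] := by
  induction A generalizing a e with
  | nil =>
    constructor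
    · simp [pvVal]
    · simp
  | cons d t ih =>
    obtain ⟨ih1, ih2⟩ := ih a e
    simp only [List.foldr_cons]
    set r := t.foldr (fun d st => pvG B st d) (PySem.Int.mod a B, e) with hr
    constructor
    · show (pvG B r d).1 = _
      simp only [pvG]
      have h1 : r.1 + PySem.Int.mod (d * r.2) B ≡
          (a + e * pvVal t) + d * (e * 10 ^ t.length) [ZMOD B] := by
        refine Int.ModEq.add ?_ ?_
        · rw [ih1]; exact pvModEq_mod _ B
        · exact (pvModEq_mod (d * r.2) B).trans (Int.ModEq.mul_left d ih2)
      rw [pvMod_congr h1]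
      congr 1
      have hv : pvVal (d :: t) = d * 10 ^ t.length + pvVal t := by
        rw [pvVal, List.foldl_cons, show (0 : Int) * 10 + d = d by ring]
        exact pvVal_from t d
      rw [hv]
      ring
    · show (pvG B r d).2 ≡ _ [ZMOD B]
      simp only [pvG]
      calc PySem.Int.mod (r.2 * 10) B
          ≡ e * 10 ^ t.length * 10 [ZMOD B] :=
            (pvModEq_mod (r.2 * 10) B).trans (Int.ModEq.mul_right 10 ih2)
        _ = e * 10 ^ (d :: t).length := by rw [List.length_cons]; ring

-- A's index loop, rewritten as a fold over the digits the indices fetch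
theorem pvIdxFold (B : Int) (A : List Int) (l : List Int) :
    l.foldr (fun i (st : Int × Int) =>
        (PySem.Int.mod (st.1 + PySem.Int.mod (PySem.List.pyGetD A i 0 * st.2) B) B,
         PySem.Int.mod (st.2 * 10) B)) ((0 : Int), (1 : Int)) =
      (l.map (fun j => PySem.List.pyGetD A j 0)).foldr (fun d st => pvG B st d) (0, 1) := by
  induction l with
  | nil => rfl
  | cons i l ih => simp [pvG, ih]

theorem solve_eq (A : List Int) (B : Int) : solve A B = PySem.Int.mod (pvVal A) B := by
  have hrange : PySem.List.pyRange ((A.length : Int) - 1) (-1) (-1) =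
      (PySem.List.pyRange 0 (A.length : Int) 1).reverse := by
    rw [PySem.List.pyRange_neg_one_eq_reverse]
    norm_num
  simp only [solve, hrange, List.foldl_reverse]
  rw [pvIdxFold, PySem.List.map_pyGetD_pyRange_zero']
  have hmain := (pvFoldr_G B A 0 1).1
  rw [pvMod_zero_left] at hmain
  rw [hmain]
  norm_num

-- ===== VERDICT (by name: the statement is the Claim_ definition above) =====
theorem solve_spec : Claim_equal_solve := by
  intro A B _ _
  unfold Spec_solve
  rw [solve_eq, solve_alt_eq]
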